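-- pv_equiv track=rewrite | github.com/csgnwinter/Banana-Ride | Website/hashing.py | hashAlgo
-- ===== SOURCE A (Python) =====
-- def hashAlgo(string,count):
--     if count == -1:
--         return string
--
--     character = string[count]
--     hashedChar = chr((ord(character)%40)+40)
--     newstring = string[:count]+hashedChar+string[count+1:]
--     string = hashAlgo(newstring,count-1)
--
--     return string
-- ===== SOURCE B (Python) =====
-- def hashAlgo(string, count):
--     if count == -1:
--         return string
--     hashed = [chr((ord(string[i]) % 40) + 40) for i in range(count + 1)]
--     return ''.join(hashed) + string[count + 1:]
-- ===== Notes on version B (the rewrite author's own statement) =====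
-- stated objective: faster
-- what changed: Replaced the recursion that rebuilds the whole string once per index with a single list-comprehension pass hashing string[i] for i in range(count+1), one join and one tail slice (O(n) instead of O(n^2)).
import Mathlib
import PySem

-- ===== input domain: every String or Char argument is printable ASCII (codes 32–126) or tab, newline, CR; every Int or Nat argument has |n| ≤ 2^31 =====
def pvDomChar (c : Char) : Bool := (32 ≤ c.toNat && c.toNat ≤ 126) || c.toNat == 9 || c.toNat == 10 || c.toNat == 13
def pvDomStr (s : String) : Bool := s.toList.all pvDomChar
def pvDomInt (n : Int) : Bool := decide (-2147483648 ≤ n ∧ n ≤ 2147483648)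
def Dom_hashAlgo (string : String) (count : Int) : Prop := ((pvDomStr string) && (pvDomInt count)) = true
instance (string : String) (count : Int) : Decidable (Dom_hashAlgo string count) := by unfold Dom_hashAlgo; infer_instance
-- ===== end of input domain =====

-- B replaces A's per-index full-string-rebuilding recursion by one comprehension pass over indices 0..count plus a tail slice (objective: faster).


-- ===== PORT A =====
-- chr((ord(c) % 40) + 40): ord(c) ≥ 0, so Nat arithmetic is exact
def pvHashChar (c : Char) : Char := Char.ofNat (c.toNat % 40 + 40)

-- fuel is only a totality guard; count.natAbs + 2 is enough for every input A returns on
def hashAlgoFuel : Nat → List Char → Int → List Char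
  | 0, s, _ => s
  | fuel + 1, s, count =>
    if count = -1 then s
    else
      match PySem.List.pyGet? s count with
      | none => s   -- Python raises IndexError here; excluded by Pre_hashAlgo
      | some character =>
        let hashedChar := pvHashChar character
        let newstring :=
          PySem.List.slice s none (some count) ++ [hashedChar] ++ PySem.List.slice s (some (count + 1)) none
        hashAlgoFuel fuel newstring (count - 1)

def hashAlgo (string : String) (count : Int) : String :=
  String.ofList (hashAlgoFuel (count.natAbs + 2) string.toList count)

-- ===== PORT B =====
def hashAlgo_alt (string : String) (count : Int) : String :=
  if count = -1 then string
  else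
    -- string[i] raises IndexError when count ≥ len(string); excluded by Pre_hashAlgo (pyGetD's default is never read there)
    let hashed := (PySem.List.pyRange 0 (count + 1) 1).map
      (fun i => pvHashChar (PySem.List.pyGetD string.toList i ' '))
    String.ofList (hashed ++ PySem.List.slice string.toList (some (count + 1)) none)

-- ===== PRECONDITION & SPEC =====
-- A raises IndexError (string[count]) exactly when count < -1 or count ≥ len(string); those inputs are excluded.
def Pre_hashAlgo (string : String) (count : Int) : Prop :=
  -1 ≤ count ∧ count < (string.toList.length : Int)
instance (string : String) (count : Int) : Decidable (Pre_hashAlgo string count) := by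
  unfold Pre_hashAlgo; infer_instance

def pvWitness_hashAlgo : String × Int := ("ab", 1)

def Spec_hashAlgo (string : String) (count : Int) (out : String) : Prop := out = hashAlgo_alt string count
instance (string : String) (count : Int) (out : String) : Decidable (Spec_hashAlgo string count out) := by
  unfold Spec_hashAlgo; infer_instance

-- ===== CLAIM (what is proved, stated in full; the proofs are below) =====
def Claim_equal_hashAlgo : Prop := ∀ (string : String) (count : Int), Dom_hashAlgo string count → Pre_hashAlgo string count → Spec_hashAlgo string count (hashAlgo string count)

-- ===== LEMMAS AND PROOFS =====
theorem hashAlgoFuel_neg_one (m : Nat) (s : List Char) : hashAlgoFuel m s (-1) = s := by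
  cases m <;> simp [hashAlgoFuel]

theorem hashAlgoFuel_spec : ∀ (n m : Nat) (cs : List Char), n < cs.length → n + 1 ≤ m →
    hashAlgoFuel m cs (n : Int) = (cs.take (n + 1)).map pvHashChar ++ cs.drop (n + 1) := by
  intro n
  induction n with
  | zero =>
    intro m cs hlen hm
    obtain ⟨m', rfl⟩ : ∃ m', m = m' + 1 := ⟨m - 1, by omega⟩
    obtain ⟨c, t, rfl⟩ : ∃ c t, cs = c :: t := by
      cases cs with
      | nil => simp at hlen
      | cons c t => exact ⟨c, t, rfl⟩
    simp [hashAlgoFuel, PySem.List.pyGet?, PySem.List.pyIdx?, hashAlgoFuel_neg_one,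
      PySem.List.slice]
  | succ n ih =>
    intro m cs hlen hm
    obtain ⟨m', rfl⟩ : ∃ m', m = m' + 1 := ⟨m - 1, by omega⟩
    have hne : ((n + 1 : Nat) : Int) ≠ -1 := by omega
    have hget : PySem.List.pyGet? cs ((n + 1 : Nat) : Int) = some cs[n + 1] := by
      rw [PySem.List.pyGet?_natCast]
      exact List.getElem?_eq_getElem hlen
    have hto : PySem.List.slice cs none (some ((n + 1 : Nat) : Int)) = cs.take (n + 1) :=
      PySem.List.slice_to_natCast cs (n + 1)
    have hfrom : PySem.List.slice cs (some (((n + 1 : Nat) : Int) + 1)) none = cs.drop (n + 2) := by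
      have : (((n + 1 : Nat) : Int) + 1) = ((n + 2 : Nat) : Int) := by push_cast; ring
      rw [this, PySem.List.slice_from_natCast]
    rw [hashAlgoFuel, if_neg hne, hget]
    simp only [hto, hfrom]
    set newcs : List Char := cs.take (n + 1) ++ [pvHashChar cs[n + 1]] ++ cs.drop (n + 2) with hnew
    have hlen' : newcs.length = cs.length := by
      simp [hnew]; omega
    have hstep : ((n + 1 : Nat) : Int) - 1 = (n : Int) := by push_cast; ring
    rw [hstep, ih m' newcs (by omega) (by omega)]
    have htake : newcs.take (n + 1) = cs.take (n + 1) := by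
      have h1 : (cs.take (n + 1)).length = n + 1 := by simp; omega
      rw [hnew, List.append_assoc, List.take_append, h1]
      simp
    have hdrop : newcs.drop (n + 1) = pvHashChar cs[n + 1] :: cs.drop (n + 2) := by
      have h1 : (cs.take (n + 1)).length = n + 1 := by simp; omega
      rw [hnew, List.append_assoc, List.drop_append, h1]
      simp
    rw [htake, hdrop]
    have htake2 : cs.take (n + 1 + 1) = cs.take (n + 1) ++ [cs[n + 1]] := by
      rw [List.take_add_one, List.getElem?_eq_getElem hlen]
      rfl
    rw [htake2, List.map_append]
    simp only [List.map_cons, List.map_nil, List.append_assoc,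
      List.cons_append, List.nil_append]

theorem hashed_eq_map_take (cs : List Char) (n : Nat) (h : n < cs.length) :
    (PySem.List.pyRange 0 ((n + 1 : Nat) : Int) 1).map
        (fun i => pvHashChar (PySem.List.pyGetD cs i ' ')) =
      (cs.take (n + 1)).map pvHashChar := by
  rw [PySem.List.pyRange_one, List.map_map]
  apply List.ext_getElem
  · simp; omega
  · intro k h1 h2
    simp only [List.length_map, List.length_take] at h2
    have hk : k < cs.length := by omega
    simp [List.getElem_map, List.getElem_range, List.getElem_take, zero_add,
      List.getD_eq_getElem?_getD, List.getElem?_eq_getElem hk]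

-- ===== VERDICT (by name: the statement is the Claim_ definition above) =====
theorem hashAlgo_spec : Claim_equal_hashAlgo := by
  intro string count _ hpre
  obtain ⟨h1, h2⟩ := hpre
  unfold Spec_hashAlgo hashAlgo hashAlgo_alt
  by_cases hc : count = -1
  · subst hc
    rw [if_pos rfl, hashAlgoFuel_neg_one, String.ofList_toList]
  · have h0 : 0 ≤ count := by omega
    obtain ⟨n, rfl⟩ : ∃ n : Nat, count = (n : Int) := ⟨count.toNat, (Int.toNat_of_nonneg h0).symm⟩
    have hn : n < string.toList.length := by exact_mod_cast h2
    rw [if_neg hc]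
    have hnatAbs : (n : Int).natAbs = n := Int.natAbs_natCast n
    rw [hnatAbs, hashAlgoFuel_spec n (n + 2) string.toList hn (by omega)]
    have hc1 : ((n : Int) + 1) = ((n + 1 : Nat) : Int) := by push_cast; ring
    rw [hc1, PySem.List.slice_from_natCast, hashed_eq_map_take string.toList n hn]
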